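-- pv_equiv track=rewrite | github.com/JasnoorKaur02/meta_scalar_hackathon | parser.py | _extract_ids_in_text_order
-- ===== SOURCE A (Python) =====
-- from typing import Optional, List
--
-- def _extract_ids_in_text_order(text: str, id_list: List[str]) -> List[str]:
--     """
--     Return IDs from id_list that appear in text, ordered by position in text.
--     All comparisons are case-insensitive (text is uppercased).
--     """
--     upper = text.upper()
--     hits = []
--     for id_ in id_list:
--         pos = upper.find(id_)
--         if pos != -1:
--             hits.append((pos, id_))
--     hits.sort(key=lambda x: x[0])
--     return [id_ for _, id_ in hits]
-- ===== SOURCE B (Python) =====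
-- from typing import List
--
-- def _extract_ids_in_text_order(text: str, id_list: List[str]) -> List[str]:
--     """Bucket the ids by their first-occurrence position and read the
--     buckets off in increasing position order (bucket sort, no comparison sort)."""
--     upper = text.upper()
--     buckets = [[] for _ in range(len(upper) + 1)]
--     for id_ in id_list:
--         pos = upper.find(id_)
--         if pos != -1:
--             buckets[pos].append(id_)
--     return [id_ for bucket in buckets for id_ in bucket]
-- ===== Notes on version B (the rewrite author's own statement) =====
-- stated objective: alternative
-- what changed: Replaces the comparison sort of (position, id) pairs with a bucket sort: ids are appended to a bucket indexed by their first-occurrence position and the buckets are concatenated in position order.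
import Mathlib
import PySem

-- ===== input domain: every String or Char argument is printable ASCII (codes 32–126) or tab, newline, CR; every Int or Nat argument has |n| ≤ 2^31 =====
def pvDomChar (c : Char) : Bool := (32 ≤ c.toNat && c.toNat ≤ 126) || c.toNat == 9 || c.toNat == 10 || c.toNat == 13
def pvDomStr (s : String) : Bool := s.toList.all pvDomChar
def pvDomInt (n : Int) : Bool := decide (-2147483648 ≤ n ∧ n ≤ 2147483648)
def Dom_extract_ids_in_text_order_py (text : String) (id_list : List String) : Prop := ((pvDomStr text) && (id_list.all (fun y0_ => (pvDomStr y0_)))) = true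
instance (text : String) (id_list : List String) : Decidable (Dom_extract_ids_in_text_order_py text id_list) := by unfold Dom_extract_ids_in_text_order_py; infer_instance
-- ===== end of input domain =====

-- B replaces A's comparison sort of (position, id) pairs by a bucket sort indexed by
-- first-occurrence position; same return value, alternative algorithm.

-- ===== PORT A =====
def extract_ids_in_text_order_py (text : String) (id_list : List String) : List String :=
  let upper := PySem.Str.upper text
  let hits : List (Int × String) := id_list.foldl (fun hits id_ =>
      let pos := PySem.Str.find upper id_
      if pos != -1 then hits ++ [(pos, id_)] else hits) []
  let sortedHits := PySem.List.sorted hits (fun x => x.1) false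
  sortedHits.map (fun x => x.2)

-- ===== PORT B =====
def extract_ids_in_text_order_py_alt (text : String) (id_list : List String) : List String :=
  let upper := PySem.Str.upper text
  let buckets : List (List String) :=
    (PySem.List.pyRange 0 (PySem.Str.len upper + 1) 1).map (fun _ => [])
  let buckets := id_list.foldl (fun bs id_ =>
      let pos := PySem.Str.find upper id_
      if pos != -1 then PySem.List.pySetD bs pos (PySem.List.pyGetD bs pos [] ++ [id_]) else bs) buckets
  buckets.flatMap (fun bucket => bucket)

-- ===== PRECONDITION & SPEC =====
def Spec_extract_ids_in_text_order_py (text : String) (id_list : List String) (out : List String) : Prop := out = extract_ids_in_text_order_py_alt text id_list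
instance (text : String) (id_list : List String) (out : List String) : Decidable (Spec_extract_ids_in_text_order_py text id_list out) := by unfold Spec_extract_ids_in_text_order_py; infer_instance

-- ===== CLAIM (what is proved, stated in full; the proofs are below) =====
def Claim_equal_extract_ids_in_text_order_py : Prop := ∀ (text : String) (id_list : List String), Dom_extract_ids_in_text_order_py text id_list → Spec_extract_ids_in_text_order_py text id_list (extract_ids_in_text_order_py text id_list)

-- ===== LEMMAS AND PROOFS =====

-- the sub-list of hits whose first-occurrence position is p
def pvF (hits : List (Int × String)) (p : Nat) : List (Int × String) :=
  hits.filter (fun x => decide (x.1 = (p : Int)))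

lemma pvF_append_singleton (hits : List (Int × String)) (x : Int × String) (p : Nat) :
    pvF (hits ++ [x]) p = pvF hits p ++ (if x.1 = (p : Int) then [x] else []) := by
  simp [pvF, List.filter_append, List.filter_cons]

lemma insertBy_middle {α : Type} (before : α → α → Bool) (x : α) (as bs : List α)
    (ha : ∀ a ∈ as, before x a = false) (hb : ∀ b ∈ bs, before x b = true) :
    PySem.List.insertBy before x (as ++ bs) = as ++ x :: bs := by
  induction as with
  | nil =>
    cases bs with
    | nil => simp [PySem.List.insertBy]
    | cons b bs => simp [PySem.List.insertBy, hb b (by simp)]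
  | cons a as ih =>
    simp only [List.cons_append, PySem.List.insertBy, ha a (by simp)]
    simp [ih (fun a h => ha a (by simp [h]))]

lemma flatMap_congr_mem {α β : Type} (l : List α) (f g : α → List β)
    (h : ∀ a ∈ l, f a = g a) : l.flatMap f = l.flatMap g := by
  induction l with
  | nil => rfl
  | cons a l ih =>
    simp [List.flatMap_cons, h a (by simp), ih (fun a ha => h a (by simp [ha]))]

-- stable sort by bounded nonnegative keys IS the concatenation of the key-buckets
lemma sorted_eq_flat (n : Nat) (hits : List (Int × String))
    (hb : ∀ x ∈ hits, 0 ≤ x.1 ∧ x.1 ≤ (n : Int)) :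
    PySem.List.sorted hits (fun x => x.1) false
      = (List.range (n+1)).flatMap (fun p => pvF hits p) := by
  induction hits using List.reverseRecOn with
  | nil => simp [PySem.List.sorted_eq_foldl_insertBy, pvF]
  | append_singleton ys x ih =>
    have hys : ∀ y ∈ ys, 0 ≤ y.1 ∧ y.1 ≤ (n : Int) := fun y hy => hb y (by simp [hy])
    have hx := hb x (by simp)
    have hqx : ((x.1.toNat : Int)) = x.1 := Int.toNat_of_nonneg hx.1
    have hqn : x.1.toNat ≤ n := by omega
    rw [PySem.List.sorted_eq_foldl_insertBy, List.foldl_append, List.foldl_cons, List.foldl_nil,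
        ← PySem.List.sorted_eq_foldl_insertBy, ih hys]
    set q := x.1.toNat with hq
    have hsplit : n + 1 = (q + 1) + (n - q) := by omega
    rw [hsplit, List.range_add]
    simp only [List.flatMap_append, List.flatMap_map]
    have hlhs : PySem.List.insertBy (fun a b => decide (a.1 < b.1)) x
        ((List.range (q+1)).flatMap (fun p => pvF ys p)
          ++ (List.range (n-q)).flatMap (fun p => pvF ys (q+1+p)))
        = (List.range (q+1)).flatMap (fun p => pvF ys p)
          ++ x :: (List.range (n-q)).flatMap (fun p => pvF ys (q+1+p)) := by
      apply insertBy_middle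
      · intro a ha
        simp only [List.mem_flatMap, List.mem_range, pvF, List.mem_filter, decide_eq_true_eq] at ha
        obtain ⟨p, hp, _, hap⟩ := ha
        simp only [decide_eq_false_iff_not, not_lt, hap]
        omega
      · intro b hbm
        simp only [List.mem_flatMap, List.mem_range, pvF, List.mem_filter, decide_eq_true_eq] at hbm
        obtain ⟨p, hp, _, hbp⟩ := hbm
        simp only [decide_eq_true_eq, hbp]
        omega
    rw [hlhs]
    -- now compute the right-hand side bucket by bucket
    have hhi : (List.range (n-q)).flatMap (fun p => pvF (ys ++ [x]) (q+1+p))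
        = (List.range (n-q)).flatMap (fun p => pvF ys (q+1+p)) := by
      apply flatMap_congr_mem
      intro p _
      rw [pvF_append_singleton]
      have hne : ¬ (x.1 = (q : Int) + 1 + (p : Int)) := by omega
      simp [hne]
    have hlo : (List.range (q+1)).flatMap (fun p => pvF (ys ++ [x]) p)
        = (List.range (q+1)).flatMap (fun p => pvF ys p) ++ [x] := by
      rw [List.range_succ, List.flatMap_append, List.flatMap_append]
      have h1 : (List.range q).flatMap (fun p => pvF (ys ++ [x]) p)
          = (List.range q).flatMap (fun p => pvF ys p) := by
        apply flatMap_congr_mem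
        intro p hp
        simp only [List.mem_range] at hp
        rw [pvF_append_singleton]
        have hne : ¬ (x.1 = (p : Int)) := by omega
        simp [hne]
      have h2 : ([q] : List Nat).flatMap (fun p => pvF (ys ++ [x]) p)
          = ([q] : List Nat).flatMap (fun p => pvF ys p) ++ [x] := by
        simp only [List.flatMap_cons, List.flatMap_nil, List.append_nil]
        rw [pvF_append_singleton, if_pos hqx.symm]
      rw [h1, h2, List.append_assoc]
    rw [hhi, hlo]
    simp

-- every recorded hit position lies in [0, n]
lemma fold_hits_bound (u : String) (n : Nat) (hn : (u.toList.length : Int) = (n : Int)) :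
    ∀ (ids : List String) (h0 : List (Int × String)),
      (∀ x ∈ h0, 0 ≤ x.1 ∧ x.1 ≤ (n : Int)) →
      ∀ x ∈ ids.foldl (fun hs id_ =>
          if PySem.Str.find u id_ != -1 then hs ++ [(PySem.Str.find u id_, id_)] else hs) h0,
        0 ≤ x.1 ∧ x.1 ≤ (n : Int) := by
  intro ids
  induction ids with
  | nil => intro h0 hb x hx; exact hb x hx
  | cons id_ ids ih =>
    intro h0 hb x hx
    simp only [List.foldl_cons] at hx
    by_cases h : (PySem.Str.find u id_ != -1) = true
    · rw [if_pos h] at hx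
      refine ih _ ?_ x hx
      intro y hy
      rcases List.mem_append.mp hy with hy | hy
      · exact hb y hy
      · simp only [List.mem_singleton] at hy
        subst hy
        have hge : -1 ≤ PySem.Str.find u id_ := by
          rw [PySem.Str.find_eq]; exact PySem.Chars.neg_one_le_find _ _
        have hne : PySem.Str.find u id_ ≠ -1 := bne_iff_ne.mp h
        have hle : PySem.Str.find u id_ ≤ (n : Int) := by
          rw [PySem.Str.find_eq, ← hn]; exact PySem.Chars.find_le_length _ _
        exact ⟨by omega, hle⟩
    · rw [if_neg h] at hx
      exact ih h0 hb x hx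

-- the bucket fold of B tracks the hit list of A, bucket by bucket
lemma fold_buckets (u : String) (n : Nat) (hn : (u.toList.length : Int) = (n : Int)) :
    ∀ (ids : List String) (h0 : List (Int × String)),
      ids.foldl (fun bs id_ =>
          if PySem.Str.find u id_ != -1 then
            PySem.List.pySetD bs (PySem.Str.find u id_)
              (PySem.List.pyGetD bs (PySem.Str.find u id_) [] ++ [id_])
          else bs)
        ((List.range (n+1)).map (fun p => (pvF h0 p).map (fun x => x.2)))
      = (List.range (n+1)).map (fun p =>
          (pvF (ids.foldl (fun hs id_ =>
              if PySem.Str.find u id_ != -1 then hs ++ [(PySem.Str.find u id_, id_)] else hs) h0) p).map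
            (fun x => x.2)) := by
  intro ids
  induction ids with
  | nil => intro h0; simp
  | cons id_ ids ih =>
    intro h0
    simp only [List.foldl_cons]
    by_cases h : (PySem.Str.find u id_ != -1) = true
    · rw [if_pos h, if_pos h]
      have hne : PySem.Str.find u id_ ≠ -1 := bne_iff_ne.mp h
      have hge : 0 ≤ PySem.Str.find u id_ := by
        have h1 : -1 ≤ PySem.Str.find u id_ := by
          rw [PySem.Str.find_eq]; exact PySem.Chars.neg_one_le_find _ _
        omega
      have hle : PySem.Str.find u id_ ≤ (n : Int) := by
        rw [PySem.Str.find_eq, ← hn]; exact PySem.Chars.find_le_length _ _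
      have hstep : PySem.List.pySetD
            ((List.range (n+1)).map (fun p => (pvF h0 p).map (fun x => x.2))) (PySem.Str.find u id_)
            (PySem.List.pyGetD ((List.range (n+1)).map (fun p => (pvF h0 p).map (fun x => x.2)))
              (PySem.Str.find u id_) [] ++ [id_])
          = (List.range (n+1)).map (fun p =>
              (pvF (h0 ++ [(PySem.Str.find u id_, id_)]) p).map (fun x => x.2)) := by
        have hlen : PySem.Str.find u id_ <
            (((List.range (n+1)).map (fun p => (pvF h0 p).map (fun x => x.2))).length : Int) := by
          rw [List.length_map, List.length_range]
          omega
        rw [PySem.List.pyGetD_eq_getElem _ _ hge hlen, PySem.List.pySetD_of_nonneg _ _ hge]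
        apply List.ext_getElem
        · simp
        · intro i hi1 hi2
          have hi' : i < n + 1 := by simpa using hi1
          have hq : (PySem.Str.find u id_).toNat < n + 1 := by omega
          simp only [List.getElem_set, List.getElem_map, List.getElem_range]
          rw [pvF_append_singleton]
          by_cases hiq : (PySem.Str.find u id_).toNat = i
          · have heq : PySem.Str.find u id_ = (i : Int) := by omega
            rw [if_pos hiq, if_pos heq, hiq]
            simp
          · have hne2 : ¬ (PySem.Str.find u id_ = (i : Int)) := by omega
            rw [if_neg hiq, if_neg hne2]
            simp
      rw [hstep, ih]
    · rw [if_neg h, if_neg h]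
      exact ih h0

-- the whole computation, stated over the uppercased text
lemma pv_main (upper : String) (ids : List String) :
    (PySem.List.sorted
        (ids.foldl (fun hs id_ =>
            if PySem.Str.find upper id_ != -1 then hs ++ [(PySem.Str.find upper id_, id_)] else hs)
          ([] : List (Int × String)))
        (fun x => x.1) false).map (fun x => x.2)
    = (ids.foldl (fun bs id_ =>
          if PySem.Str.find upper id_ != -1 then
            PySem.List.pySetD bs (PySem.Str.find upper id_)
              (PySem.List.pyGetD bs (PySem.Str.find upper id_) [] ++ [id_])
          else bs)
        ((PySem.List.pyRange 0 (PySem.Str.len upper + 1) 1).map (fun _ => ([] : List String)))).flatMap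
        (fun bucket => bucket) := by
  have hn : ((upper.toList.length : Int)) = ((upper.toList.length : Nat) : Int) := rfl
  have hinit : (PySem.List.pyRange 0 (PySem.Str.len upper + 1) 1).map (fun _ => ([] : List String))
      = (List.range (upper.toList.length + 1)).map
          (fun p => (pvF ([] : List (Int × String)) p).map (fun x => x.2)) := by
    rw [PySem.Str.len_eq, PySem.List.pyRange_one]
    have h1 : (((upper.toList.length : Int)) + 1 - 0).toNat = upper.toList.length + 1 := by omega
    rw [h1, List.map_map]
    rfl
  rw [hinit, fold_buckets upper upper.toList.length hn ids [],
      sorted_eq_flat upper.toList.length _ (fold_hits_bound upper upper.toList.length hn ids [] (by simp)),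
      List.map_flatMap, List.flatMap_map]

-- ===== VERDICT (by name: the statement is the Claim_ definition above) =====
theorem extract_ids_in_text_order_py_spec : Claim_equal_extract_ids_in_text_order_py := by
  intro text id_list _
  unfold Spec_extract_ids_in_text_order_py
  simp only [extract_ids_in_text_order_py, extract_ids_in_text_order_py_alt]
  exact pv_main (PySem.Str.upper text) id_list
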